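-- pv_equiv track=rewrite | github.com/Wulfic/Cicada3301 | Tools/extract_columnar_w29.py | read_columns
-- ===== SOURCE A (Python) =====
-- def read_columns(grid):
--     """Read column by column"""
--     text = []
--     cols = len(grid[0]) if grid else 0
--     rows = len(grid)
--
--     for c in range(cols):
--         for r in range(rows):
--             if grid[r][c]:
--                 text.append(grid[r][c])
--
--     return ''.join(text)
-- ===== SOURCE B (Python) =====
-- def read_columns(grid):
--     """Read column by column"""
--     cols = len(grid[0]) if grid else 0
--     columns = [[] for _ in range(cols)]
--     for row in grid:
--         columns = [col + [row[c]] if row[c] else col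
--                    for c, col in enumerate(columns)]
--     return ''.join(''.join(col) for col in columns)
-- ===== Notes on version B (the rewrite author's own statement) =====
-- stated objective: alternative
-- what changed: B makes a single row-major pass that groups the truthy cells into per-column bucket lists and finally joins the buckets in column order, instead of A's column-major nested index scan appending to one flat list.
import Mathlib
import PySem

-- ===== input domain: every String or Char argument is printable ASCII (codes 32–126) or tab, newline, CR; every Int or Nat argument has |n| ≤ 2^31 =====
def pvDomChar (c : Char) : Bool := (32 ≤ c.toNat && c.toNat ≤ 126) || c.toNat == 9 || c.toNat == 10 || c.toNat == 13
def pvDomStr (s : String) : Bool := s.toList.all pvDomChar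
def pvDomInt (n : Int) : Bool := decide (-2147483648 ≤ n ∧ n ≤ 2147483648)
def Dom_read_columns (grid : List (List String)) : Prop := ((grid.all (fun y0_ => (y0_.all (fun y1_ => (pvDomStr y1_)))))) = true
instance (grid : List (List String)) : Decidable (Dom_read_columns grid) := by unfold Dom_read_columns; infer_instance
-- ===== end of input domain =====

-- B replaces A's column-major nested index scan by one row-major pass that groups
-- truthy cells into per-column bucket lists and joins the buckets (alternative
-- decomposition, same cost). Equivalence is about the return value; neither mutates.

-- ===== PORT A =====
def read_columns (grid : List (List String)) : String :=
  let cols : Int := match grid with | [] => 0 | g0 :: _ => PySem.List.len g0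
  let rows : Int := PySem.List.len grid
  let text : List String :=
    (PySem.List.pyRange 0 cols).foldl (fun acc c =>
      (PySem.List.pyRange 0 rows).foldl (fun acc r =>
        let cell := PySem.List.pyGetD (PySem.List.pyGetD grid r []) c ""
        if cell ≠ "" then acc ++ [cell] else acc) acc) []
  PySem.Str.join "" text

-- ===== PORT B =====
def read_columns_alt (grid : List (List String)) : String :=
  let cols : Int := match grid with | [] => 0 | g0 :: _ => PySem.List.len g0
  let columns0 : List (List String) := List.replicate cols.toNat []
  let columns : List (List String) := grid.foldl (fun cs row =>
    (PySem.List.enumerate cs).map (fun p =>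
      let cell := PySem.List.pyGetD row p.1 ""
      if cell ≠ "" then p.2 ++ [cell] else p.2)) columns0
  PySem.Str.join "" (columns.map (fun col => PySem.Str.join "" col))

-- ===== PRECONDITION & SPEC =====
-- Pre_ excludes ragged grids in which some row is shorter than the first row:
-- there the Python A (and B) raises IndexError at grid[r][c].
def Pre_read_columns (grid : List (List String)) : Prop :=
  ∀ row ∈ grid, (grid.headD []).length ≤ row.length
instance (grid : List (List String)) : Decidable (Pre_read_columns grid) := by
  unfold Pre_read_columns; infer_instance

def pvWitness_read_columns : List (List String) := [["a", "b"], ["", "c"]]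

def Spec_read_columns (grid : List (List String)) (out : String) : Prop := out = read_columns_alt grid
instance (grid : List (List String)) (out : String) : Decidable (Spec_read_columns grid out) := by unfold Spec_read_columns; infer_instance

-- ===== CLAIM (what is proved, stated in full; the proofs are below) =====
def Claim_equal_read_columns : Prop := ∀ (grid : List (List String)), Dom_read_columns grid → Pre_read_columns grid → Spec_read_columns grid (read_columns grid)

-- ===== LEMMAS AND PROOFS =====

-- the cells of column c that Python's truthiness test keeps, in row order
def colOf (grid : List (List String)) (c : Int) : List String :=
  (grid.filter (fun row => PySem.List.pyGetD row c "" ≠ "")).map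
    (fun row => PySem.List.pyGetD row c "")

theorem foldRowsA (l : List (List String)) (c : Int) (acc : List String) :
    l.foldl (fun acc row =>
        if PySem.List.pyGetD row c "" ≠ "" then acc ++ [PySem.List.pyGetD row c ""] else acc) acc
      = acc ++ colOf l c := by
  simpa [colOf] using
    PySem.List.foldl_append_if (fun row => decide (PySem.List.pyGetD row c "" ≠ ""))
      (fun row => PySem.List.pyGetD row c "") l acc

theorem innerA (grid : List (List String)) (c : Int) (acc : List String) :
    (PySem.List.pyRange 0 (PySem.List.len grid)).foldl (fun acc r =>
        let cell := PySem.List.pyGetD (PySem.List.pyGetD grid r []) c ""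
        if cell ≠ "" then acc ++ [cell] else acc) acc
      = acc ++ colOf grid c := by
  calc
    (PySem.List.pyRange 0 (PySem.List.len grid)).foldl (fun acc r =>
        let cell := PySem.List.pyGetD (PySem.List.pyGetD grid r []) c ""
        if cell ≠ "" then acc ++ [cell] else acc) acc
      = ((PySem.List.pyRange 0 (PySem.List.len grid)).map
          (fun j => PySem.List.pyGetD grid j [])).foldl (fun acc row =>
            if PySem.List.pyGetD row c "" ≠ "" then acc ++ [PySem.List.pyGetD row c ""] else acc) acc := by
          rw [List.foldl_map]
    _ = acc ++ colOf grid c := by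
          rw [PySem.List.map_pyGetD_pyRange_zero, foldRowsA]

theorem enum_map {α β : Type} (cs : List α) (s : Int) (g : Int × α → β) :
    PySem.List.enumerate ((PySem.List.enumerate cs s).map g) s
      = (PySem.List.enumerate cs s).map (fun p => (p.1, g p)) := by
  induction cs generalizing s with
  | nil => simp [PySem.List.enumerate]
  | cons x t ih => simp [PySem.List.enumerate, ih]

theorem enum_replicate {α : Type} (n : Nat) (a : α) (s : Int) :
    PySem.List.enumerate (List.replicate n a) s
      = (List.range n).map (fun k : Nat => (s + (k : Int), a)) := by
  induction n generalizing s with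
  | zero => simp [PySem.List.enumerate]
  | succ m ih =>
      rw [List.replicate_succ, List.range_succ_eq_map]
      simp only [PySem.List.enumerate, ih, List.map_cons, List.map_map]
      congr 1
      · simp
      · refine List.map_congr_left fun k _ => ?_
        simp [Function.comp, Nat.succ_eq_add_one]
        push_cast
        ring

theorem colOf_cons (row : List String) (rest : List (List String)) (c : Int) :
    colOf (row :: rest) c
      = (if PySem.List.pyGetD row c "" ≠ "" then PySem.List.pyGetD row c "" :: colOf rest c
         else colOf rest c) := by
  by_cases h : PySem.List.pyGetD row c "" = ""
  · simp [colOf, List.filter_cons, h]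
  · simp [colOf, List.filter_cons, h]

theorem Bmain (grid : List (List String)) (cs : List (List String)) :
    grid.foldl (fun cs row =>
        (PySem.List.enumerate cs).map (fun p =>
          let cell := PySem.List.pyGetD row p.1 ""
          if cell ≠ "" then p.2 ++ [cell] else p.2)) cs
      = (PySem.List.enumerate cs).map (fun p => p.2 ++ colOf grid p.1) := by
  induction grid generalizing cs with
  | nil => simp [colOf]
  | cons row rest ih =>
      rw [List.foldl_cons, ih, enum_map, List.map_map]
      refine List.map_congr_left fun p _ => ?_
      simp only [Function.comp, colOf_cons]
      split_ifs with h
      · simp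
      · rfl

-- ''.join is concatenation of the pieces' characters
theorem intercalate_nil_left (L : List (List Char)) : List.intercalate [] L = L.flatten := by
  induction L with
  | nil => simp [List.intercalate]
  | cons x t ih =>
      cases t with
      | nil => simp [List.intercalate]
      | cons y u =>
          simp only [List.intercalate, List.intersperse] at *
          simpa using ih

theorem join_empty (parts : List String) :
    PySem.Str.join "" parts = String.ofList ((parts.map String.toList).flatten) := by
  simp [PySem.Str.join, PySem.Chars.join, intercalate_nil_left]

theorem join_flatMap {α : Type} (l : List α) (g : α → List String) :
    PySem.Str.join "" (l.flatMap g)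
      = PySem.Str.join "" (l.map (fun x => PySem.Str.join "" (g x))) := by
  simp only [join_empty]
  congr 1
  induction l with
  | nil => simp
  | cons x t ih => simp [ih]

-- ===== VERDICT (by name: the statement is the Claim_ definition above) =====
theorem read_columns_spec : Claim_equal_read_columns := by
  intro grid _ _
  unfold Spec_read_columns read_columns read_columns_alt
  simp only [innerA, Bmain]
  rw [PySem.List.foldl_append_eq_flatMap (fun c => colOf grid c)]
  cases grid with
  | nil => simp [PySem.List.pyRange, colOf]
  | cons g0 rest =>
      simp only [PySem.List.len, PySem.List.pyRange_zero_natCast, Int.toNat_natCast,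
        enum_replicate, List.map_map, List.nil_append, List.flatMap_map]
      rw [join_flatMap]
      refine congrArg _ (List.map_congr_left fun k _ => ?_)
      simp [Function.comp]
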